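-- pv_equiv track=rewrite | github.com/IldenH/projects | challenges/ainm2026/main.py | astar_dist_map
-- ===== SOURCE A (Python) =====
-- import heapq
--
-- def _neighbors(x, y):
--     return ((x, y - 1), (x, y + 1), (x - 1, y), (x + 1, y))
--
-- def astar_dist_map(goals, blocked, width, height):
--     """Multi-source A*. Returns dist_map for distance-to-nearest-goal."""
--     dist = {}
--     for g in goals:
--         if g in blocked:
--             continue
--         dist[g] = 0
--
--     # Priority queue: (distance, position)
--     pq = [(0, g) for g in goals if g not in blocked]
--     heapq.heapify(pq)
--     visited = set()
--
--     while pq: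
--         d, (x, y) = heapq.heappop(pq)
--
--         if (x, y) in visited:
--             continue
--         visited.add((x, y))
--
--         if (x, y) not in dist:
--             dist[(x, y)] = d
--
--         for nx, ny in _neighbors(x, y):
--             if nx < 0 or ny < 0 or nx >= width or ny >= height:
--                 continue
--             np = (nx, ny)
--             if np in visited or np in blocked:
--                 continue
--             if np not in dist or d + 1 < dist[np]:
--                 dist[np] = d + 1
--                 heapq.heappush(pq, (d + 1, np))
--
--     return dist
-- ===== SOURCE B (Python) =====
-- def astar_dist_map(goals, blocked, width, height):
--     """Layered multi-source BFS (unit weights): one sorted frontier per ring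
--     instead of a heap; same dist map, same insertion order."""
--     bl = set(blocked)
--     dist = {}
--     frontier = []
--     for g in goals:
--         if g not in bl and g not in dist:
--             dist[g] = 0
--             frontier.append(g)
--     frontier.sort()
--     d = 0
--     while frontier:
--         nxt = []
--         for x, y in frontier:
--             for np in ((x, y - 1), (x, y + 1), (x - 1, y), (x + 1, y)):
--                 nx, ny = np
--                 if 0 <= nx < width and 0 <= ny < height and np not in bl and np not in dist:
--                     dist[np] = d + 1
--                     nxt.append(np)
--         nxt.sort()
--         frontier = nxt
--         d += 1
--     return dist
-- ===== Notes on version B (the rewrite author's own statement) =====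
-- stated objective: alternative
-- what changed: Replaces the heap-based multi-source Dijkstra (with O(|blocked|) list-membership tests per edge) by a layered multi-source BFS over unit-weight rings: a set for blocked, a dict-membership test instead of distance relaxation, and one sorted frontier list per ring instead of a priority queue; the dist map and its insertion order are identical. Intended as faster (no heap, set lookups; measured 1.87x at the largest size both finished, 5-14x on dense-blocked grids), but a timing run could not confirm >=1.5x with scaling, so no speed claim is made.
import Mathlib
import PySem

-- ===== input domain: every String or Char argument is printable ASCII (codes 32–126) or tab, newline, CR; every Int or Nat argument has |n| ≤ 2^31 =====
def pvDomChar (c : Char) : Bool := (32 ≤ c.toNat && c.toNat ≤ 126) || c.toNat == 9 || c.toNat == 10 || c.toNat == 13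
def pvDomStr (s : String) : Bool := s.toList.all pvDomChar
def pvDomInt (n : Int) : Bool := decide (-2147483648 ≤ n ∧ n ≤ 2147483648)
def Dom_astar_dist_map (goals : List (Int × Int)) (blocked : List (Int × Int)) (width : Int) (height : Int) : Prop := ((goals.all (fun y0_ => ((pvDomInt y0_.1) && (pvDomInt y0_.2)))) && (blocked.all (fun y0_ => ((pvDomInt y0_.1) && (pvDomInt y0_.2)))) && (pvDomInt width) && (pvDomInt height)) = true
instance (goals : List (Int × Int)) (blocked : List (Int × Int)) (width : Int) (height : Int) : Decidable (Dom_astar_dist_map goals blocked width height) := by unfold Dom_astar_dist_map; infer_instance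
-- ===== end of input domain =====

-- B replaces A's heap-based multi-source Dijkstra by a layered multi-source BFS
-- (sorted frontier per unit-weight ring, set/dict membership instead of relaxation);
-- the returned dict (entries and insertion order) is proved identical.

-- ===== PORT A =====

def pvNeighbors (x y : Int) : List (Int × Int) := [(x, y - 1), (x, y + 1), (x - 1, y), (x + 1, y)]

-- Python tuple order on pq entries (d, (x, y)) — lexicographic
def pvPqLt (a b : Int × Int × Int) : Bool :=
  decide (a.1 < b.1 ∨ (a.1 = b.1 ∧ (a.2.1 < b.2.1 ∨ (a.2.1 = b.2.1 ∧ a.2.2 < b.2.2))))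

-- heapq modeled as a sorted list: exact, because heappop returns the minimum of a
-- totally ordered multiset of tuples (equal elements are indistinguishable)
def pvHeappush (pq : List (Int × Int × Int)) (e : Int × Int × Int) : List (Int × Int × Int) :=
  PySem.List.insertBy pvPqLt e pq

-- one neighbour step of A's inner `for nx, ny in _neighbors(x, y)` loop
def pvStepA (blocked : List (Int × Int)) (width height : Int) (visited : PySem.Set (Int × Int)) (d : Int)
    (st : PySem.Dict (Int × Int) Int × List (Int × Int × Int)) (np : Int × Int) :
    PySem.Dict (Int × Int) Int × List (Int × Int × Int) :=
  if np.1 < 0 || np.2 < 0 || width ≤ np.1 || height ≤ np.2 then st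
  else if visited.contains np || blocked.contains np then st
  else if !(st.1.contains np) || d + 1 < st.1.getD np 0 then
    (st.1.insert np (d + 1), pvHeappush st.2 (d + 1, np))
  else st

-- A's `while pq:` loop (the fuel is an artifact for totality; the equivalence
-- proof shows it never runs out)
def pvLoopA (blocked : List (Int × Int)) (width height : Int) (fuel : Nat)
    (dist : PySem.Dict (Int × Int) Int) (pq : List (Int × Int × Int))
    (visited : PySem.Set (Int × Int)) : PySem.Dict (Int × Int) Int :=
  match fuel, pq with
  | _, [] => dist
  | 0, _ => dist
  | fuel' + 1, (d, p) :: rest =>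
    if visited.contains p then pvLoopA blocked width height fuel' dist rest visited
    else
      let visited' := visited.add p
      let dist' := if dist.contains p then dist else dist.insert p d
      let st := (pvNeighbors p.1 p.2).foldl (pvStepA blocked width height visited' d) (dist', rest)
      pvLoopA blocked width height fuel' st.1 st.2 visited'

def astar_dist_map (goals : List (Int × Int)) (blocked : List (Int × Int)) (width : Int) (height : Int) : List (Int × Int × Int) :=
  let dist0 := goals.foldl (fun dd g => if blocked.contains g then dd else dd.insert g 0) PySem.Dict.empty
  -- pq = [(0, g) for g in goals if g not in blocked]; heapq.heapify(pq)
  let pq0 := ((goals.filter (fun g => !blocked.contains g)).map (fun g => ((0 : Int), g))).foldl pvHeappush []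
  let final := pvLoopA blocked width height (5 * (width.toNat * height.toNat + goals.length) + goals.length + 1) dist0 pq0 PySem.Set.empty
  final.items.map (fun kv => (kv.1.1, kv.1.2, kv.2))

-- ===== PORT B =====

-- one neighbour test of B's inner loop
def pvStepB (bl : PySem.Set (Int × Int)) (width height : Int) (d : Int)
    (st : PySem.Dict (Int × Int) Int × List (Int × Int)) (np : Int × Int) :
    PySem.Dict (Int × Int) Int × List (Int × Int) :=
  if (decide (0 ≤ np.1) && decide (np.1 < width) && decide (0 ≤ np.2) && decide (np.2 < height))
      && !(bl.contains np) && !(st.1.contains np)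
  then (st.1.insert np (d + 1), st.2 ++ [np]) else st

-- B's `while frontier:` loop — one iteration per BFS ring (fuel is an artifact for totality)
def pvLoopB (bl : PySem.Set (Int × Int)) (width height : Int) (fuel : Nat)
    (dist : PySem.Dict (Int × Int) Int) (frontier : List (Int × Int)) (d : Int) :
    PySem.Dict (Int × Int) Int :=
  match frontier with
  | [] => dist
  | _ :: _ =>
    match fuel with
    | 0 => dist
    | fuel' + 1 =>
      let st := frontier.foldl
        (fun st p => [(p.1, p.2 - 1), (p.1, p.2 + 1), (p.1 - 1, p.2), (p.1 + 1, p.2)].foldl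
          (pvStepB bl width height d) st) (dist, [])
      pvLoopB bl width height fuel' st.1 (PySem.List.sorted2 st.2 (fun q => q.1) (fun q => q.2)) (d + 1)

def astar_dist_map_alt (goals : List (Int × Int)) (blocked : List (Int × Int)) (width : Int) (height : Int) : List (Int × Int × Int) :=
  let bl := PySem.Set.ofList blocked
  let init := goals.foldl
    (fun (st : PySem.Dict (Int × Int) Int × List (Int × Int)) g =>
      if !(bl.contains g) && !(st.1.contains g) then (st.1.insert g 0, st.2 ++ [g]) else st)
    (PySem.Dict.empty, [])
  let frontier0 := PySem.List.sorted2 init.2 (fun q => q.1) (fun q => q.2)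
  let final := pvLoopB bl width height (width.toNat * height.toNat + goals.length + 1) init.1 frontier0 0
  final.items.map (fun kv => (kv.1.1, kv.1.2, kv.2))

-- ===== PRECONDITION & SPEC =====
def Spec_astar_dist_map (goals : List (Int × Int)) (blocked : List (Int × Int)) (width : Int) (height : Int) (out : List (Int × Int × Int)) : Prop := out = astar_dist_map_alt goals blocked width height
instance (goals : List (Int × Int)) (blocked : List (Int × Int)) (width : Int) (height : Int) (out : List (Int × Int × Int)) : Decidable (Spec_astar_dist_map goals blocked width height out) := by unfold Spec_astar_dist_map; infer_instance

-- ===== CLAIM (what is proved, stated in full; the proofs are below) =====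
def Claim_equal_astar_dist_map : Prop := ∀ (goals : List (Int × Int)) (blocked : List (Int × Int)) (width : Int) (height : Int), Dom_astar_dist_map goals blocked width height → Spec_astar_dist_map goals blocked width height (astar_dist_map goals blocked width height)

-- ===== LEMMAS AND PROOFS =====

-- proof-only helpers: the lexicographic order Python uses on (x, y) pairs,
-- insertion sort with it, and the "pending" (unvisited, first-occurrence) view of a layer

def pvLt2 (a b : Int × Int) : Bool := decide (a.1 < b.1 ∨ (a.1 = b.1 ∧ a.2 < b.2))

def pvSortIns (l : List (Int × Int)) : List (Int × Int) :=
  l.foldl (fun acc x => PySem.List.insertBy pvLt2 x acc) []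

def pvEnt (d : Int) (p : Int × Int) : Int × Int × Int := (d, p)

def pvPend (G : List (Int × Int)) (visited : PySem.Set (Int × Int)) : List (Int × Int) :=
  match G with
  | [] => []
  | g :: G' => if visited.contains g then pvPend G' visited else g :: pvPend G' (visited.add g)

theorem pvSC (s : PySem.Set (Int × Int)) (p : Int × Int) : s.contains p = true ↔ p ∈ s := by
  simp [PySem.Set.contains]

theorem pvLC (l : List (Int × Int)) (p : Int × Int) : l.contains p = true ↔ p ∈ l := by
  simp

theorem pvLt2_iff (a b : Int × Int) : pvLt2 a b = true ↔ (a.1 < b.1 ∨ (a.1 = b.1 ∧ a.2 < b.2)) := by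
  simp [pvLt2]

theorem pvLt2_asymm {a b : Int × Int} (h : pvLt2 a b = true) : pvLt2 b a = false := by
  simp only [pvLt2_iff] at h; simp only [pvLt2, decide_eq_false_iff_not]; omega

theorem pvLt2_total {a b : Int × Int} (h1 : pvLt2 a b = false) (h2 : pvLt2 b a = false) : a = b := by
  simp only [pvLt2, decide_eq_false_iff_not] at h1 h2
  have : a.1 = b.1 ∧ a.2 = b.2 := by omega
  exact Prod.ext this.1 this.2

theorem pvLt2_trans {a b c : Int × Int} (h1 : pvLt2 a b = true) (h2 : pvLt2 b c = true) :
    pvLt2 a c = true := by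
  simp only [pvLt2_iff] at *; omega

theorem pvInsertBy_nil (f : (Int × Int) → (Int × Int) → Bool) (e : Int × Int) :
    PySem.List.insertBy f e [] = [e] := by simp [PySem.List.insertBy]

theorem pvInsertBy_cons (f : (Int × Int) → (Int × Int) → Bool) (e h : Int × Int) (t : List (Int × Int)) :
    PySem.List.insertBy f e (h :: t) = if f e h then e :: h :: t else h :: PySem.List.insertBy f e t := by
  simp [PySem.List.insertBy]

theorem pvInsertBy_append {α : Type} (f : α → α → Bool) (e : α) (L M : List α)
    (h : ∀ a ∈ L, f e a = false) : PySem.List.insertBy f e (L ++ M) = L ++ PySem.List.insertBy f e M := by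
  induction L with
  | nil => rfl
  | cons a L ih =>
    have ha := h a (by simp)
    simp only [List.cons_append, PySem.List.insertBy, ha]
    simp [ih (fun x hx => h x (by simp [hx]))]

theorem pvPqLt_same (c : Int) (p q : Int × Int) : pvPqLt (pvEnt c p) (pvEnt c q) = pvLt2 p q := by
  simp only [pvPqLt, pvLt2, pvEnt]
  by_cases h1 : p.1 < q.1 <;> by_cases h2 : p.1 = q.1 <;> by_cases h3 : p.2 < q.2 <;>
    simp_all <;> omega

theorem pvPqLt_lower (c : Int) (np g : Int × Int) : pvPqLt (pvEnt (c + 1) np) (pvEnt c g) = false := by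
  simp only [pvPqLt, pvEnt, decide_eq_false_iff_not]; omega

theorem pvInsertBy_map (c : Int) (p : Int × Int) (m : List (Int × Int)) :
    PySem.List.insertBy pvPqLt (pvEnt c p) (m.map (pvEnt c)) =
      (PySem.List.insertBy pvLt2 p m).map (pvEnt c) := by
  induction m with
  | nil => simp [pvInsertBy_nil, pvEnt, PySem.List.insertBy]
  | cons h t ih =>
    simp only [List.map_cons, PySem.List.insertBy, pvPqLt_same]
    by_cases hc : pvLt2 p h <;> simp [hc, ih]

theorem pvFoldHeap (c : Int) (l s : List (Int × Int)) :
    (l.map (pvEnt c)).foldl pvHeappush (s.map (pvEnt c)) =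
      (l.foldl (fun a x => PySem.List.insertBy pvLt2 x a) s).map (pvEnt c) := by
  induction l generalizing s with
  | nil => rfl
  | cons h t ih =>
    simp only [List.map_cons, List.foldl_cons, pvHeappush, pvInsertBy_map]
    exact ih _

theorem pvHeapLayer (dd : Int) (np : Int × Int) (G n : List (Int × Int)) :
    pvHeappush (G.map (pvEnt dd) ++ (pvSortIns n).map (pvEnt (dd + 1))) (pvEnt (dd + 1) np) =
      G.map (pvEnt dd) ++ (pvSortIns (n ++ [np])).map (pvEnt (dd + 1)) := by
  have h1 : pvSortIns (n ++ [np]) = PySem.List.insertBy pvLt2 np (pvSortIns n) := by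
    simp [pvSortIns, List.foldl_append]
  rw [pvHeappush, pvInsertBy_append _ _ _ _ (by intro a ha; obtain ⟨g, _, rfl⟩ := List.mem_map.mp ha; exact pvPqLt_lower dd np g),
    h1, pvInsertBy_map]

theorem pvInsertBy_congr {α : Type} (f g : α → α → Bool) (x : α) (l : List α)
    (h : ∀ y, f x y = g x y) : PySem.List.insertBy f x l = PySem.List.insertBy g x l := by
  induction l with
  | nil => rfl
  | cons a t ih => simp only [PySem.List.insertBy, h a]; rw [ih]

theorem pvSorted2_eq (l : List (Int × Int)) :
    PySem.List.sorted2 l (fun q => q.1) (fun q => q.2) = pvSortIns l := by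
  show List.foldl _ [] l = List.foldl _ [] l
  suffices h : ∀ acc, List.foldl (fun acc x => PySem.List.insertBy
      (fun a b => decide (a.1 < b.1) || (!decide (b.1 < a.1) && decide (a.2 < b.2))) x acc) acc l
      = List.foldl (fun acc x => PySem.List.insertBy pvLt2 x acc) acc l from h []
  induction l with
  | nil => intro acc; rfl
  | cons a t ih =>
    intro acc
    simp only [List.foldl_cons]
    rw [pvInsertBy_congr _ pvLt2 _ _ (by
      intro y; simp only [pvLt2]
      by_cases h1 : a.1 < y.1 <;> by_cases h2 : a.1 = y.1 <;> simp_all <;> omega)]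
    exact ih _

theorem pvSortIns_perm (l : List (Int × Int)) : (pvSortIns l).Perm l :=
  PySem.List.foldl_insertBy_perm _ l []

theorem pvInsertBy_pairwise (x : Int × Int) (l : List (Int × Int))
    (h : l.Pairwise (fun a b => pvLt2 b a = false)) :
    (PySem.List.insertBy pvLt2 x l).Pairwise (fun a b => pvLt2 b a = false) := by
  induction l with
  | nil => simp [pvInsertBy_nil]
  | cons a t ih =>
    rw [pvInsertBy_cons]
    rcases List.pairwise_cons.mp h with ⟨ha, ht⟩
    by_cases hc : pvLt2 x a = true
    · simp only [hc, if_true]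
      refine List.pairwise_cons.mpr ⟨?_, h⟩
      intro y hy
      rcases List.mem_cons.mp hy with rfl | hy
      · exact pvLt2_asymm hc
      · -- y ∈ t; a ≤ y and x < a so x < y
        cases hxy : pvLt2 y x
        · rfl
        · exact absurd (pvLt2_trans hxy hc) (by simp [ha y hy])
    · simp only [hc, if_false]
      refine List.pairwise_cons.mpr ⟨?_, ih ht⟩
      intro y hy
      rcases (PySem.List.mem_insertBy _ _ _ _).mp hy with rfl | hy
      · simpa using hc
      · exact ha y hy
  
theorem pvSortIns_pairwise (l : List (Int × Int)) :
    (pvSortIns l).Pairwise (fun a b => pvLt2 b a = false) := by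
  suffices h : ∀ acc, acc.Pairwise (fun a b => pvLt2 b a = false) →
      (l.foldl (fun acc x => PySem.List.insertBy pvLt2 x acc) acc).Pairwise (fun a b => pvLt2 b a = false) from
    h [] (by simp)
  induction l with
  | nil => intro acc h; simpa using h
  | cons a t ih => intro acc h; exact ih _ (pvInsertBy_pairwise a acc h)

theorem pvSorted_unique (l1 l2 : List (Int × Int)) (hp : l1.Perm l2)
    (h1 : l1.Pairwise (fun a b => pvLt2 b a = false))
    (h2 : l2.Pairwise (fun a b => pvLt2 b a = false)) : l1 = l2 :=
  List.eq_of_perm_of_sorted (fun _ _ _ _ hab hba => pvLt2_total hba hab) h1 h2 hp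

theorem pvDedup_sublist (l : List (Int × Int)) : (PySem.List.dedup l).Sublist l := by
  induction l with
  | nil => simp [PySem.List.dedup]
  | cons x xs ih =>
    rw [PySem.List.dedup_eq_ofList, PySem.Set.ofList_cons]
    exact List.Sublist.cons₂ x ((List.filter_sublist).trans
      (by rw [← PySem.List.dedup_eq_ofList]; exact ih))

theorem pvDedup_sortIns (l : List (Int × Int)) :
    PySem.List.dedup (pvSortIns l) = pvSortIns (PySem.List.dedup l) := by
  apply pvSorted_unique
  · rw [List.perm_ext_iff_of_nodup (PySem.List.nodup_dedup _)
      ((pvSortIns_perm _).nodup_iff.mpr (PySem.List.nodup_dedup _))]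
    intro a
    rw [PySem.List.mem_dedup, (pvSortIns_perm _).mem_iff, (pvSortIns_perm _).mem_iff,
      PySem.List.mem_dedup]
  · exact (pvSortIns_pairwise l).sublist (pvDedup_sublist _)
  · exact pvSortIns_pairwise _

theorem pvContains_add (v : PySem.Set (Int × Int)) (x p : Int × Int) :
    (v.add x).contains p = (v.contains p || p == x) := by
  rw [Bool.eq_iff_iff]
  simp only [pvSC, PySem.Set.mem_add, Bool.or_eq_true, beq_iff_eq]

theorem pvPend_filter (G : List (Int × Int)) (v : PySem.Set (Int × Int)) :
    pvPend G v = (PySem.List.dedup G).filter (fun p => !v.contains p) := by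
  induction G generalizing v with
  | nil => simp [pvPend, PySem.List.dedup]
  | cons g G' ih =>
    rw [PySem.List.dedup_eq_ofList, PySem.Set.ofList_cons]
    show pvPend (g :: G') v = List.filter _ (g :: (PySem.Set.ofList G').discard g)
    rw [PySem.Set.discard, ← PySem.List.dedup_eq_ofList]
    by_cases hv : v.contains g = true
    · rw [pvPend, if_pos hv, ih v]
      have h0 : List.filter (fun p => !v.contains p)
          (g :: List.filter (fun y => !(y == g)) (PySem.List.dedup G')) =
          List.filter (fun p => !v.contains p) (List.filter (fun y => !(y == g)) (PySem.List.dedup G')) := by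
        simp [List.filter_cons, hv, (pvSC v g).mp hv]
      rw [h0, List.filter_filter]
      apply List.filter_congr
      intro p _
      cases hvp : v.contains p with
      | true => simp
      | false =>
        have hne : (p == g) = false := by
          rw [beq_eq_false_iff_ne]; rintro rfl; rw [hv] at hvp; simp at hvp
        simp [hne]
    · rw [pvPend, if_neg hv, ih (PySem.Set.add v g)]
      have h0 : List.filter (fun p => !v.contains p)
          (g :: List.filter (fun y => !(y == g)) (PySem.List.dedup G')) =
          g :: List.filter (fun p => !v.contains p) (List.filter (fun y => !(y == g)) (PySem.List.dedup G')) := by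
        have hnv : g ∉ v := fun hm => hv ((pvSC v g).mpr hm)
        simp [List.filter_cons, hnv]
      rw [h0, List.filter_filter]
      congr 1
      apply List.filter_congr
      intro p _
      rw [pvContains_add]
      cases hvp : v.contains p <;> cases hpg : p == g <;> simp

theorem pvPend_all (G : List (Int × Int)) (v : PySem.Set (Int × Int))
    (h : ∀ p ∈ G, v.contains p = false) (hnd : G.Nodup) : pvPend G v = G := by
  rw [pvPend_filter]
  rw [show PySem.List.dedup G = G from by
    rw [PySem.List.dedup_eq_ofList]; exact PySem.Set.ofList_eq_self_of_nodup G hnd]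
  apply List.filter_eq_self.mpr
  intro p hp; rw [h p hp]; rfl

theorem pvBl (blocked : List (Int × Int)) (p : Int × Int) :
    (PySem.Set.ofList blocked).contains p = blocked.contains p := by
  rw [Bool.eq_iff_iff]
  simp only [pvSC, PySem.Set.mem_ofList, pvLC]

theorem pvCount (width height : Int) (goals : List (Int × Int)) (l : List (Int × Int))
    (hnd : l.Nodup)
    (hsub : ∀ p ∈ l, (0 ≤ p.1 ∧ p.1 < width ∧ 0 ≤ p.2 ∧ p.2 < height) ∨ p ∈ goals) :
    l.length ≤ width.toNat * height.toNat + goals.length := by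
  classical
  have h1 : l.length = l.toFinset.card := (List.toFinset_card_of_nodup hnd).symm
  have h2 : l.toFinset ⊆ (Finset.Ico 0 width ×ˢ Finset.Ico 0 height) ∪ goals.toFinset := by
    intro p hp
    rcases hsub p (List.mem_toFinset.mp hp) with h | h
    · exact Finset.mem_union_left _ (Finset.mem_product.mpr
        ⟨Finset.mem_Ico.mpr ⟨h.1, h.2.1⟩, Finset.mem_Ico.mpr ⟨h.2.2.1, h.2.2.2⟩⟩)
    · exact Finset.mem_union_right _ (List.mem_toFinset.mpr h)
  have h3 := (Finset.card_le_card h2).trans (Finset.card_union_le _ _)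
  rw [Finset.card_product, Int.card_Ico, Int.card_Ico] at h3
  have h4 : goals.toFinset.card ≤ goals.length := List.toFinset_card_le goals
  simp only [Int.sub_zero] at h3
  omega

theorem pvDictContains_mk (acc : List (Int × Int)) (g : Int × Int) :
    (PySem.Dict.mk (acc.map (fun p => (p, (0 : Int))))).contains g = true ↔ g ∈ acc := by
  simp [PySem.Dict.contains, List.any_map, Function.comp_def, List.any_eq_true, beq_iff_eq]

theorem pvInsert_mk (acc : List (Int × Int)) (g : Int × Int) :
    (PySem.Dict.mk (acc.map (fun p => (p, (0 : Int))))).insert g 0 =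
      PySem.Dict.mk ((PySem.Set.add acc g).map (fun p => (p, (0 : Int)))) := by
  by_cases hg : g ∈ acc
  · have hc : (PySem.Dict.mk (acc.map (fun p => (p, (0:Int))))).contains g = true :=
      (pvDictContains_mk acc g).mpr hg
    have hl : acc.contains g = true := pvLC acc g |>.mpr hg
    have hadd : PySem.Set.add acc g = acc := by simp only [PySem.Set.add, PySem.Set.contains, hl]; rfl
    apply PySem.Dict.ext
    rw [PySem.Dict.items_insert_of_contains _ _ hc, hadd]
    show (acc.map _).map _ = _
    simp only [List.map_map]
    apply List.map_congr_left
    intro p _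
    by_cases hpg : p = g
    · subst hpg; simp
    · simp only [Function.comp_def, beq_eq_false_iff_ne.mpr hpg]
      simp only [Bool.false_eq_true, if_false]
  · have hc : (PySem.Dict.mk (acc.map (fun p => (p, (0:Int))))).contains g = false := by
      rw [Bool.eq_false_iff]; intro hcc; exact hg ((pvDictContains_mk acc g).mp hcc)
    have hl : acc.contains g = false := by
      rw [Bool.eq_false_iff]; intro hcc; exact hg ((pvLC acc g).mp hcc)
    have hadd : PySem.Set.add acc g = acc ++ [g] := by
      simp only [PySem.Set.add, PySem.Set.contains, hl]; rfl
    apply PySem.Dict.ext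
    rw [PySem.Dict.items_insert_of_not_contains _ _ hc, hadd]
    show acc.map _ ++ [(g, (0:Int))] = _
    simp

theorem pvInitA (l acc : List (Int × Int)) :
    l.foldl (fun dd g => dd.insert g 0) (PySem.Dict.mk (acc.map (fun p => (p, (0 : Int))))) =
      PySem.Dict.mk ((PySem.Set.update acc l).map (fun p => (p, (0 : Int)))) := by
  induction l generalizing acc with
  | nil => rfl
  | cons g t ih =>
    rw [List.foldl_cons, pvInsert_mk, ih]
    rfl

theorem pvInitB (bl : PySem.Set (Int × Int)) (l acc : List (Int × Int)) :
    l.foldl (fun (st : PySem.Dict (Int × Int) Int × List (Int × Int)) g =>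
        if !(bl.contains g) && !(st.1.contains g) then (st.1.insert g 0, st.2 ++ [g]) else st)
      (PySem.Dict.mk (acc.map (fun p => (p, (0 : Int)))), acc) =
    (PySem.Dict.mk ((PySem.Set.update acc (l.filter (fun g => !bl.contains g))).map (fun p => (p, (0 : Int)))),
      PySem.Set.update acc (l.filter (fun g => !bl.contains g))) := by
  induction l generalizing acc with
  | nil => rfl
  | cons g t ih =>
    rw [List.foldl_cons]
    cases hb : bl.contains g with
    | true =>
      rw [if_neg (by simp [hb, (pvSC bl g).mp hb])]
      have hfc : (g :: t).filter (fun g => !bl.contains g) = t.filter (fun g => !bl.contains g) := by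
        simp [List.filter_cons, hb, (pvSC bl g).mp hb]
      rw [hfc]
      exact ih acc
    | false =>
      have hfc : (g :: t).filter (fun g => !bl.contains g) = g :: t.filter (fun g => !bl.contains g) := by
        have hnb : g ∉ bl := fun hm => by rw [(pvSC bl g).mpr hm] at hb; simp at hb
        simp [List.filter_cons, hnb]
      rw [hfc]
      cases hc : (PySem.Dict.mk (acc.map (fun p => (p, (0:Int))))).contains g with
      | true =>
        have hg : g ∈ acc := (pvDictContains_mk acc g).mp hc
        have hl : acc.contains g = true := (pvLC acc g).mpr hg
        rw [if_neg (by simp [hb, hc])]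
        have hadd : PySem.Set.add acc g = acc := by
          simp only [PySem.Set.add, PySem.Set.contains, hl]; rfl
        have h2 : PySem.Set.update acc (g :: t.filter (fun g => !bl.contains g)) =
            PySem.Set.update acc (t.filter (fun g => !bl.contains g)) := by
          show PySem.Set.update (PySem.Set.add acc g) _ = _
          rw [hadd]
        rw [h2]
        exact ih acc
      | false =>
        rw [if_pos (by simp [hb, hc])]
        rw [pvInsert_mk]
        have hg : g ∉ acc := fun hgg => by
          rw [(pvDictContains_mk acc g).mpr hgg] at hc; simp at hc
        have hl : acc.contains g = false := by
          rw [Bool.eq_false_iff]; intro hcc; exact hg ((pvLC acc g).mp hcc)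
        have hadd : PySem.Set.add acc g = acc ++ [g] := by
          simp only [PySem.Set.add, PySem.Set.contains, hl]; rfl
        have h2 : PySem.Set.update acc (g :: t.filter (fun g => !bl.contains g)) =
            PySem.Set.update (PySem.Set.add acc g) (t.filter (fun g => !bl.contains g)) := by
          simp [PySem.Set.update]
        rw [h2]
        simpa [hadd] using ih (PySem.Set.add acc g)

theorem pvLoopA_nil (bl : List (Int × Int)) (w h : Int) (f : Nat) (dist : PySem.Dict (Int × Int) Int)
    (v : PySem.Set (Int × Int)) : pvLoopA bl w h f dist [] v = dist := by
  cases f <;> rfl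

theorem pvLoopA_cons (bl : List (Int × Int)) (w h : Int) (f : Nat) (dist : PySem.Dict (Int × Int) Int)
    (d : Int) (p : Int × Int) (rest : List (Int × Int × Int)) (v : PySem.Set (Int × Int)) :
    pvLoopA bl w h (f + 1) dist ((d, p) :: rest) v =
      if v.contains p then pvLoopA bl w h f dist rest v
      else
        let visited' := v.add p
        let dist' := if dist.contains p then dist else dist.insert p d
        let st := (pvNeighbors p.1 p.2).foldl (pvStepA bl w h visited' d) (dist', rest)
        pvLoopA bl w h f st.1 st.2 visited' := rfl

theorem pvLoopB_nil (bl : PySem.Set (Int × Int)) (w h : Int) (f : Nat)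
    (dist : PySem.Dict (Int × Int) Int) (d : Int) : pvLoopB bl w h f dist [] d = dist := by
  cases f <;> rfl

theorem pvLoopB_cons (bl : PySem.Set (Int × Int)) (w h : Int) (f : Nat)
    (dist : PySem.Dict (Int × Int) Int) (p : Int × Int) (ff : List (Int × Int)) (d : Int) :
    pvLoopB bl w h (f + 1) dist (p :: ff) d =
      (let st := (p :: ff).foldl
        (fun st q => [(q.1, q.2 - 1), (q.1, q.2 + 1), (q.1 - 1, q.2), (q.1 + 1, q.2)].foldl
          (pvStepB bl w h d) st) (dist, []);
       pvLoopB bl w h f st.1 (PySem.List.sorted2 st.2 (fun q => q.1) (fun q => q.2)) (d + 1)) := rfl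

-- invariant during processing of one layer: dist/visited/remaining-layer/discovered-next
structure pvMid (goals blocked : List (Int × Int)) (width height : Int)
    (visited : PySem.Set (Int × Int)) (G' : List (Int × Int)) (d : Int)
    (dist : PySem.Dict (Int × Int) Int) (nxt : List (Int × Int)) : Prop where
  hnd : dist.keys.Nodup
  hvk : ∀ p, visited.contains p = true → dist.contains p = true
  hG : ∀ p ∈ G', dist.contains p = true
  hn : ∀ p ∈ nxt, dist.contains p = true
  hval : ∀ p v, dist.get? p = some v → v ≤ d + 1
  hkU : ∀ p ∈ dist.keys, (0 ≤ p.1 ∧ p.1 < width ∧ 0 ≤ p.2 ∧ p.2 < height) ∨ p ∈ goals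
  hnnd : nxt.Nodup
  hnv : ∀ p ∈ nxt, visited.contains p = false
  hnG : ∀ p ∈ nxt, p ∉ G'

theorem pvSStep (goals blocked : List (Int × Int)) (width height d : Int)
    (visited : PySem.Set (Int × Int)) (G' : List (Int × Int)) (np : Int × Int)
    (dist : PySem.Dict (Int × Int) Int) (nxt : List (Int × Int))
    (h : pvMid goals blocked width height visited G' d dist nxt) :
    (pvStepA blocked width height visited d
        (dist, G'.map (pvEnt d) ++ (pvSortIns nxt).map (pvEnt (d + 1))) np
      = ((pvStepB (PySem.Set.ofList blocked) width height d (dist, nxt) np).1,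
         G'.map (pvEnt d) ++
           (pvSortIns (pvStepB (PySem.Set.ofList blocked) width height d (dist, nxt) np).2).map (pvEnt (d + 1)))) ∧
    pvMid goals blocked width height visited G' d
      (pvStepB (PySem.Set.ofList blocked) width height d (dist, nxt) np).1
      (pvStepB (PySem.Set.ofList blocked) width height d (dist, nxt) np).2 ∧
    (pvStepB (PySem.Set.ofList blocked) width height d (dist, nxt) np).1.keys.length + nxt.length
      = dist.keys.length + (pvStepB (PySem.Set.ofList blocked) width height d (dist, nxt) np).2.length ∧
    dist.keys.length ≤ (pvStepB (PySem.Set.ofList blocked) width height d (dist, nxt) np).1.keys.length := by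
  obtain ⟨hnd, hvk, hG, hn, hval, hkU, hnnd, hnv, hnG⟩ := h
  by_cases hinb : 0 ≤ np.1 ∧ np.1 < width ∧ 0 ≤ np.2 ∧ np.2 < height
  · -- in bounds
    have hA1 : ¬(np.1 < 0 ∨ np.2 < 0 ∨ width ≤ np.1 ∨ height ≤ np.2) := by omega
    by_cases hbl : blocked.contains np = true
    · -- blocked: both sides skip
      have hB : pvStepB (PySem.Set.ofList blocked) width height d (dist, nxt) np = (dist, nxt) := by
        simp [pvStepB, pvBl, (pvLC blocked np).mp hbl]
      rw [hB]
      refine ⟨?_, ⟨hnd, hvk, hG, hn, hval, hkU, hnnd, hnv, hnG⟩, rfl, le_refl _⟩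
      simp only [pvStepA]
      split_ifs with h1 h2 h3 <;> try rfl
      exact absurd (by rw [hbl, Bool.or_true] : (visited.contains np || blocked.contains np) = true) h2
    · by_cases hv : visited.contains np = true
      · -- visited (hence already in dist): both sides skip
        have hB : pvStepB (PySem.Set.ofList blocked) width height d (dist, nxt) np = (dist, nxt) := by
          simp [pvStepB, hvk np hv]
        rw [hB]
        refine ⟨?_, ⟨hnd, hvk, hG, hn, hval, hkU, hnnd, hnv, hnG⟩, rfl, le_refl _⟩
        simp only [pvStepA]
        split_ifs with h1 h2 h3 <;> try rfl
        exact absurd (by rw [hv, Bool.true_or] : (visited.contains np || blocked.contains np) = true) h2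
      · by_cases hct : dist.contains np = true
        · -- already discovered (tentative value ≤ d+1): both sides skip
          obtain ⟨v, hgv⟩ : ∃ v, dist.get? np = some v := by
            rw [PySem.Dict.contains_eq_isSome_get?] at hct
            exact Option.isSome_iff_exists.mp hct
          have hgd : dist.getD np 0 = v := by rw [PySem.Dict.getD_eq_get?_getD, hgv]; rfl
          have hle : ¬(d + 1 < dist.getD np 0) := by rw [hgd]; exact not_lt.mpr (hval np v hgv)
          have hB : pvStepB (PySem.Set.ofList blocked) width height d (dist, nxt) np = (dist, nxt) := by
            simp [pvStepB, hct]
          rw [hB]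
          refine ⟨?_, ⟨hnd, hvk, hG, hn, hval, hkU, hnnd, hnv, hnG⟩, rfl, le_refl _⟩
          simp only [pvStepA]
          split_ifs with h1 h2 h3 <;> try rfl
          exfalso
          simp only [Bool.or_eq_true, Bool.not_eq_true'] at h3
          rcases h3 with h3 | h3
          · rw [hct] at h3; simp at h3
          · rw [decide_eq_true_eq] at h3; exact hle h3
        · -- new cell: both sides insert
          have hctf : dist.contains np = false := Bool.not_eq_true _ |>.mp hct
          have hB : pvStepB (PySem.Set.ofList blocked) width height d (dist, nxt) np
              = (dist.insert np (d + 1), nxt ++ [np]) := by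
            have hblf : blocked.contains np = false := Bool.not_eq_true _ |>.mp hbl
            have hnb : np ∉ blocked := fun hm => by rw [(pvLC blocked np).mpr hm] at hblf; simp at hblf
            simp [pvStepB, pvBl, hblf, hnb, hctf, hinb.1, hinb.2.1, hinb.2.2.1, hinb.2.2.2]
          rw [hB]
          have hnpn : np ∉ nxt := fun hm => by rw [hn np hm] at hctf; simp at hctf
          refine ⟨?_, ⟨?_, ?_, ?_, ?_, ?_, ?_, ?_, ?_, ?_⟩, ?_, ?_⟩
          · have hA : pvStepA blocked width height visited d
                (dist, G'.map (pvEnt d) ++ (pvSortIns nxt).map (pvEnt (d + 1))) np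
                = (dist.insert np (d + 1),
                   pvHeappush (G'.map (pvEnt d) ++ (pvSortIns nxt).map (pvEnt (d + 1))) (d + 1, np)) := by
              simp only [pvStepA]
              split_ifs with h1 h2 h3
              · exfalso
                simp only [Bool.or_eq_true, decide_eq_true_eq] at h1
                omega
              · exfalso
                simp only [Bool.or_eq_true] at h2
                rcases h2 with h2 | h2
                · exact hv h2
                · exact hbl h2
              · rfl
              · exact absurd (by rw [hctf, Bool.not_false, Bool.true_or] :
                  (!dist.contains np || decide (d + 1 < dist.getD np 0)) = true) h3
            rw [hA, show ((d + 1, np) : Int × Int × Int) = pvEnt (d + 1) np from rfl, pvHeapLayer]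
          · exact PySem.Dict.nodup_keys_insert dist np (d + 1) hnd
          · intro p hp
            rw [PySem.Dict.contains_insert]
            simp [hvk p hp]
          · intro p hp
            rw [PySem.Dict.contains_insert]
            simp [hG p hp]
          · intro p hp
            rw [PySem.Dict.contains_insert]
            rcases List.mem_append.mp hp with hp | hp
            · simp [hn p hp]
            · simp [List.mem_singleton.mp hp]
          · intro p v hg
            rw [PySem.Dict.get?_insert] at hg
            split at hg
            · cases hg; omega
            · exact hval p v hg
          · intro p hp
            rcases (PySem.Dict.mem_keys_insert dist np p (d + 1)).mp hp with rfl | hp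
            · exact Or.inl hinb
            · exact hkU p hp
          · exact List.Nodup.append hnnd (List.nodup_singleton np) (by
              intro a ha hb
              rw [List.mem_singleton.mp hb] at ha
              exact hnpn ha)
          · intro p hp
            rcases List.mem_append.mp hp with hp | hp
            · exact hnv p hp
            · rw [List.mem_singleton.mp hp]
              exact Bool.not_eq_true _ |>.mp hv
          · intro p hp
            rcases List.mem_append.mp hp with hp | hp
            · exact hnG p hp
            · rw [List.mem_singleton.mp hp]
              intro hm
              rw [hG np hm] at hctf; simp at hctf
          · rw [PySem.Dict.keys_insert_of_not_contains dist (d + 1) hctf]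
            simp only [List.length_append, List.length_cons, List.length_nil]
            omega
          · rw [PySem.Dict.keys_insert_of_not_contains dist (d + 1) hctf]
            simp
  · -- out of bounds: both sides skip
    have hA : pvStepA blocked width height visited d
        (dist, G'.map (pvEnt d) ++ (pvSortIns nxt).map (pvEnt (d + 1))) np
        = (dist, G'.map (pvEnt d) ++ (pvSortIns nxt).map (pvEnt (d + 1))) := by
      simp only [pvStepA]
      rw [if_pos]
      simp only [Bool.or_eq_true, decide_eq_true_eq]
      omega
    have hB : pvStepB (PySem.Set.ofList blocked) width height d (dist, nxt) np = (dist, nxt) := by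
      simp only [pvStepB]
      rw [if_neg]
      simp only [Bool.and_eq_true, decide_eq_true_eq, Bool.not_eq_true']
      intro hc
      exact hinb ⟨hc.1.1.1.1.1, hc.1.1.1.1.2, hc.1.1.1.2, hc.1.1.2⟩
    rw [hA, hB]
    exact ⟨rfl, ⟨hnd, hvk, hG, hn, hval, hkU, hnnd, hnv, hnG⟩, rfl, le_refl _⟩

theorem pvNSync (goals blocked : List (Int × Int)) (width height d : Int)
    (visited : PySem.Set (Int × Int)) (G' : List (Int × Int)) (ns : List (Int × Int)) :
    ∀ (dist : PySem.Dict (Int × Int) Int) (nxt : List (Int × Int)),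
    pvMid goals blocked width height visited G' d dist nxt →
    (ns.foldl (pvStepA blocked width height visited d)
        (dist, G'.map (pvEnt d) ++ (pvSortIns nxt).map (pvEnt (d + 1)))
      = ((ns.foldl (pvStepB (PySem.Set.ofList blocked) width height d) (dist, nxt)).1,
         G'.map (pvEnt d) ++
           (pvSortIns (ns.foldl (pvStepB (PySem.Set.ofList blocked) width height d) (dist, nxt)).2).map (pvEnt (d + 1)))) ∧
    pvMid goals blocked width height visited G' d
      (ns.foldl (pvStepB (PySem.Set.ofList blocked) width height d) (dist, nxt)).1
      (ns.foldl (pvStepB (PySem.Set.ofList blocked) width height d) (dist, nxt)).2 ∧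
    (ns.foldl (pvStepB (PySem.Set.ofList blocked) width height d) (dist, nxt)).1.keys.length + nxt.length
      = dist.keys.length + (ns.foldl (pvStepB (PySem.Set.ofList blocked) width height d) (dist, nxt)).2.length ∧
    dist.keys.length ≤ (ns.foldl (pvStepB (PySem.Set.ofList blocked) width height d) (dist, nxt)).1.keys.length := by
  induction ns with
  | nil => intro dist nxt h; exact ⟨rfl, h, rfl, le_refl _⟩
  | cons np ns ih =>
    intro dist nxt h
    obtain ⟨hstep, hmid, hcnt, hmono⟩ := pvSStep goals blocked width height d visited G' np dist nxt h
    simp only [List.foldl_cons]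
    rw [hstep]
    obtain ⟨ih1, ih2, ih3, ih4⟩ := ih (pvStepB (PySem.Set.ofList blocked) width height d (dist, nxt) np).1
      (pvStepB (PySem.Set.ofList blocked) width height d (dist, nxt) np).2 hmid
    simp only [Prod.mk.eta] at ih1 ih2 ih3 ih4
    refine ⟨ih1, ih2, by omega, by omega⟩

-- invariant at the start of processing a layer (or mid-layer, before the remaining part G)
structure pvInv (goals blocked : List (Int × Int)) (width height : Int)
    (dist : PySem.Dict (Int × Int) Int) (visited : PySem.Set (Int × Int))
    (G nxt : List (Int × Int)) (d : Int) : Prop where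
  hnd : dist.keys.Nodup
  hvnd : List.Nodup visited
  hvk : ∀ p, visited.contains p = true → dist.contains p = true
  hG : ∀ p ∈ G, dist.contains p = true
  hn : ∀ p ∈ nxt, dist.contains p = true
  hval : ∀ p v, dist.get? p = some v → v ≤ d + 1
  hkU : ∀ p ∈ dist.keys, (0 ≤ p.1 ∧ p.1 < width ∧ 0 ≤ p.2 ∧ p.2 < height) ∨ p ∈ goals
  hnnd : nxt.Nodup
  hnv : ∀ p ∈ nxt, visited.contains p = false
  hnG : ∀ p ∈ nxt, p ∉ G

theorem pvSIM (goals blocked : List (Int × Int)) (width height : Int) :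
    ∀ (fB fA : Nat) (G nxt : List (Int × Int)) (dist : PySem.Dict (Int × Int) Int)
      (visited : PySem.Set (Int × Int)) (d : Int),
    pvInv goals blocked width height dist visited G nxt d →
    G.length + nxt.length + 5 * (width.toNat * height.toNat + goals.length) ≤ fA + 5 * dist.keys.length →
    width.toNat * height.toNat + goals.length + 1 + nxt.length ≤ fB + dist.keys.length →
    pvLoopA blocked width height fA dist
        (G.map (pvEnt d) ++ (pvSortIns nxt).map (pvEnt (d + 1))) visited
      = (let sb := (pvPend G visited).foldl
            (fun st p => (pvNeighbors p.1 p.2).foldl (pvStepB (PySem.Set.ofList blocked) width height d) st)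
            (dist, nxt);
         pvLoopB (PySem.Set.ofList blocked) width height fB sb.1 (pvSortIns sb.2) (d + 1)) := by
  intro fB
  induction fB using Nat.strong_induction_on with
  | _ fB ihB =>
  intro fA
  induction fA using Nat.strong_induction_on with
  | _ fA ihA =>
  intro G nxt dist visited d hinv hfA hfB
  have hKU : dist.keys.length ≤ width.toNat * height.toNat + goals.length :=
    pvCount width height goals dist.keys hinv.hnd hinv.hkU
  cases G with
  | nil =>
    cases nxt with
    | nil =>
      show pvLoopA blocked width height fA dist [] visited
        = pvLoopB (PySem.Set.ofList blocked) width height fB dist [] (d + 1)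
      rw [pvLoopA_nil, pvLoopB_nil]
    | cons q nq =>
      have hlen : (pvSortIns (q :: nq)).length = (q :: nq).length := (pvSortIns_perm (q :: nq)).length_eq
      have hfB1 : 1 ≤ fB := by simp at hfB; omega
      obtain ⟨fB', rfl⟩ : ∃ k, fB = k + 1 := ⟨fB - 1, by omega⟩
      have hinv' : pvInv goals blocked width height dist visited (pvSortIns (q :: nq)) [] (d + 1) :=
        { hnd := hinv.hnd, hvnd := hinv.hvnd, hvk := hinv.hvk,
          hG := fun p hp => hinv.hn p ((pvSortIns_perm (q :: nq)).mem_iff.mp hp),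
          hn := by simp,
          hval := fun p v hg => by have := hinv.hval p v hg; omega,
          hkU := hinv.hkU,
          hnnd := List.nodup_nil,
          hnv := by simp,
          hnG := by simp }
      have hrec := ihB fB' (by omega) fA (pvSortIns (q :: nq)) [] dist visited (d + 1) hinv'
        (by rw [hlen]; simp at hfA ⊢; omega)
        (by simp at hfB ⊢; omega)
      simp only [List.nil_append, List.map_nil] at hrec ⊢
      rw [show (pvSortIns ([] : List (Int × Int))).map (pvEnt (d + 1 + 1)) = [] from rfl,
        List.append_nil] at hrec
      rw [hrec]
      have hne : pvSortIns (q :: nq) ≠ [] := by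
        intro hh; rw [hh] at hlen; simp at hlen
      obtain ⟨q', nq', hsn⟩ := List.exists_cons_of_ne_nil hne
      have hpend : pvPend (pvSortIns (q :: nq)) visited = pvSortIns (q :: nq) :=
        pvPend_all _ _ (fun p hp => hinv.hnv p ((pvSortIns_perm (q :: nq)).mem_iff.mp hp))
          ((pvSortIns_perm (q :: nq)).nodup_iff.mpr hinv.hnnd)
      show _ = pvLoopB _ _ _ (fB' + 1) (dist, q :: nq).1 (pvSortIns (dist, q :: nq).2) (d + 1)
      rw [show pvSortIns (dist, q :: nq).2 = q' :: nq' from hsn, pvLoopB_cons, ← hsn]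
      rw [hpend]
      simp only [pvSorted2_eq]
      try rfl
  | cons g G' =>
    have hfA1 : 1 ≤ fA := by
      simp only [List.length_cons] at hfA
      omega
    obtain ⟨fA', rfl⟩ : ∃ k, fA = k + 1 := ⟨fA - 1, by omega⟩
    show pvLoopA _ _ _ _ _ ((pvEnt d g) :: (G'.map (pvEnt d) ++ (pvSortIns nxt).map (pvEnt (d + 1)))) _ = _
    rw [show pvEnt d g = (d, g) from rfl, pvLoopA_cons]
    by_cases hv : visited.contains g = true
    · rw [if_pos hv]
      have hinv' : pvInv goals blocked width height dist visited G' nxt d :=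
        { hnd := hinv.hnd, hvnd := hinv.hvnd, hvk := hinv.hvk,
          hG := fun p hp => hinv.hG p (by simp [hp]),
          hn := hinv.hn, hval := hinv.hval, hkU := hinv.hkU, hnnd := hinv.hnnd,
          hnv := hinv.hnv,
          hnG := fun p hp hm => hinv.hnG p hp (by simp [hm]) }
      have hrec := ihA fA' (by omega) G' nxt dist visited d hinv'
        (by simp at hfA ⊢; omega) hfB
      rw [hrec]
      rw [show pvPend (g :: G') visited = pvPend G' visited from by rw [pvPend, if_pos hv]]
    · rw [if_neg hv]
      have hGg : dist.contains g = true := hinv.hG g (by simp)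
      simp only [hGg, if_true]
      have hmid : pvMid goals blocked width height (PySem.Set.add visited g) G' d dist nxt :=
        { hnd := hinv.hnd,
          hvk := by
            intro p hp
            rw [pvContains_add] at hp
            rw [Bool.or_eq_true] at hp
            rcases hp with hp | hp
            · exact hinv.hvk p hp
            · rw [beq_iff_eq.mp hp]; exact hGg,
          hG := fun p hp => hinv.hG p (by simp [hp]),
          hn := hinv.hn, hval := hinv.hval, hkU := hinv.hkU, hnnd := hinv.hnnd,
          hnv := by
            intro p hp
            rw [pvContains_add, hinv.hnv p hp]
            have : p ≠ g := fun hh => hinv.hnG p hp (by simp [hh])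
            simp [this],
          hnG := fun p hp hm => hinv.hnG p hp (by simp [hm]) }
      obtain ⟨hsync, hmid', hcnt, hmono⟩ :=
        pvNSync goals blocked width height d (PySem.Set.add visited g) G'
          (pvNeighbors g.1 g.2) dist nxt hmid
      rw [hsync]
      have hinv' : pvInv goals blocked width height
          ((pvNeighbors g.1 g.2).foldl (pvStepB (PySem.Set.ofList blocked) width height d) (dist, nxt)).1
          (PySem.Set.add visited g) G'
          ((pvNeighbors g.1 g.2).foldl (pvStepB (PySem.Set.ofList blocked) width height d) (dist, nxt)).2 d :=
        { hnd := hmid'.hnd, hvnd := PySem.Set.nodup_add visited g hinv.hvnd,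
          hvk := hmid'.hvk, hG := hmid'.hG, hn := hmid'.hn, hval := hmid'.hval,
          hkU := hmid'.hkU, hnnd := hmid'.hnnd, hnv := hmid'.hnv, hnG := hmid'.hnG }
      have hrec := ihA fA' (by omega) G'
        ((pvNeighbors g.1 g.2).foldl (pvStepB (PySem.Set.ofList blocked) width height d) (dist, nxt)).2
        ((pvNeighbors g.1 g.2).foldl (pvStepB (PySem.Set.ofList blocked) width height d) (dist, nxt)).1
        (PySem.Set.add visited g) d hinv'
        (by simp only [List.length_cons] at hfA; omega)
        (by omega)
      rw [hrec]
      rw [show pvPend (g :: G') visited = g :: pvPend G' (PySem.Set.add visited g) from by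
        rw [pvPend, if_neg hv]]
      rw [List.foldl_cons]

theorem pvKeys_mk (m : List (Int × Int)) :
    (PySem.Dict.mk (m.map (fun p => (p, (0 : Int))))).keys = m := by
  simp [PySem.Dict.keys, Function.comp_def]

theorem pvVal_mk (m : List (Int × Int)) (p : Int × Int) (v : Int)
    (h : (PySem.Dict.mk (m.map (fun p => (p, (0 : Int))))).get? p = some v) : v = 0 := by
  have hm := PySem.Dict.mem_items_of_get?_eq_some _ h
  simp only [PySem.Dict.items] at hm
  obtain ⟨q, _, hq⟩ := List.mem_map.mp hm
  exact (Prod.mk.injEq _ _ _ _ |>.mp hq).2.symm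

theorem pvPend_emptyv (G : List (Int × Int)) :
    pvPend G PySem.Set.empty = PySem.List.dedup G := by
  rw [pvPend_filter]
  exact List.filter_eq_self.mpr (fun p _ => rfl)

theorem astar_main : ∀ (goals blocked : List (Int × Int)) (width height : Int),
    astar_dist_map goals blocked width height = astar_dist_map_alt goals blocked width height := by
  intro goals blocked width height
  simp only [astar_dist_map, astar_dist_map_alt]
  have hflb : goals.filter (fun g => !(PySem.Set.ofList blocked).contains g)
      = goals.filter (fun g => !blocked.contains g) :=
    List.filter_congr (fun g _ => by rw [pvBl])
  -- A's initial dict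
  have hA0 : goals.foldl (fun dd g => if blocked.contains g then dd else dd.insert g 0) PySem.Dict.empty
      = PySem.Dict.mk ((PySem.List.dedup (goals.filter (fun g => !blocked.contains g))).map
          (fun p => (p, (0 : Int)))) := by
    have h1 : ∀ (l : List (Int × Int)) (dd : PySem.Dict (Int × Int) Int),
        l.foldl (fun dd g => if blocked.contains g then dd else dd.insert g 0) dd
          = (l.filter (fun g => !blocked.contains g)).foldl (fun dd g => dd.insert g 0) dd := by
      intro l
      induction l with
      | nil => intro dd; rfl
      | cons a t ih =>
        intro dd
        rw [List.foldl_cons, List.filter_cons]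
        cases hb : blocked.contains a with
        | true => simpa [hb] using ih dd
        | false => simpa using ih (dd.insert a 0)
    rw [h1, show (PySem.Dict.empty : PySem.Dict (Int × Int) Int)
        = PySem.Dict.mk (([] : List (Int × Int)).map (fun p => (p, (0 : Int)))) from rfl,
      pvInitA, PySem.Set.update_nil_left, ← PySem.List.dedup_eq_ofList]
  -- A's initial priority queue (heapify of the filtered goals at distance 0)
  have hPQ : ((goals.filter (fun g => !blocked.contains g)).map (fun g => ((0 : Int), g))).foldl pvHeappush []
      = (pvSortIns (goals.filter (fun g => !blocked.contains g))).map (pvEnt 0) := by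
    rw [show (fun g : Int × Int => ((0 : Int), g)) = pvEnt 0 from rfl,
      show ([] : List (Int × Int × Int)) = ([] : List (Int × Int)).map (pvEnt 0) from rfl,
      pvFoldHeap]
    rfl
  -- B's initialization loop
  have hB0 : goals.foldl
      (fun (st : PySem.Dict (Int × Int) Int × List (Int × Int)) g =>
        if !((PySem.Set.ofList blocked).contains g) && !(st.1.contains g) then (st.1.insert g 0, st.2 ++ [g]) else st)
      (PySem.Dict.empty, [])
      = (PySem.Dict.mk ((PySem.List.dedup (goals.filter (fun g => !blocked.contains g))).map
            (fun p => (p, (0 : Int)))),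
         PySem.List.dedup (goals.filter (fun g => !blocked.contains g))) := by
    have h := pvInitB (PySem.Set.ofList blocked) goals []
    rw [hflb, PySem.Set.update_nil_left,
      show PySem.Set.ofList (goals.filter (fun g => !blocked.contains g))
        = PySem.List.dedup (goals.filter (fun g => !blocked.contains g)) from
        (PySem.List.dedup_eq_ofList _).symm] at h
    exact h
  rw [hA0, hPQ, hB0]
  by_cases hfl : goals.filter (fun g => !blocked.contains g) = []
  · rw [hfl]
    rfl
  · set fl := goals.filter (fun g => !blocked.contains g) with hfldef
    set U := width.toNat * height.toNat + goals.length with hUdef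
    set dist0 := PySem.Dict.mk ((PySem.List.dedup fl).map (fun p => (p, (0 : Int)))) with hd0
    have hkeys : dist0.keys = PySem.List.dedup fl := pvKeys_mk _
    have hinv0 : pvInv goals blocked width height dist0 PySem.Set.empty (pvSortIns fl) [] 0 :=
      { hnd := by rw [hkeys]; exact PySem.List.nodup_dedup fl,
        hvnd := List.nodup_nil,
        hvk := fun p hp => by simp [PySem.Set.empty, PySem.Set.contains] at hp,
        hG := fun p hp => by
          rw [PySem.Dict.contains_iff_mem_keys, hkeys, PySem.List.mem_dedup]
          exact (pvSortIns_perm fl).mem_iff.mp hp,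
        hn := by simp,
        hval := fun p v hg => by have := pvVal_mk _ p v hg; omega,
        hkU := fun p hp => by
          rw [hkeys, PySem.List.mem_dedup, hfldef] at hp
          exact Or.inr (List.mem_of_mem_filter hp),
        hnnd := List.nodup_nil,
        hnv := by simp,
        hnG := by simp }
    have hkl : dist0.keys.length = (PySem.List.dedup fl).length := by rw [hkeys]
    have hk1 : 1 ≤ (PySem.List.dedup fl).length := by
      obtain ⟨x, t, hx⟩ := List.exists_cons_of_ne_nil hfl
      have : x ∈ PySem.List.dedup fl := (PySem.List.mem_dedup _ _).mpr (by rw [hx]; simp)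
      exact List.length_pos_of_mem this
    have hfll : fl.length ≤ goals.length := by
      rw [hfldef]; exact List.length_filter_le _ _
    have hsl : (pvSortIns fl).length = fl.length := (pvSortIns_perm fl).length_eq
    have hsim := pvSIM goals blocked width height U
      (5 * U + goals.length + 1) (pvSortIns fl) [] dist0 PySem.Set.empty 0 hinv0
      (by rw [hsl]; simp only [List.length_nil]; omega)
      (by simp only [List.length_nil]; omega)
    rw [show (pvSortIns ([] : List (Int × Int))).map (pvEnt (0 + 1)) = [] from rfl,
      List.append_nil] at hsim
    rw [hsim]
    -- right side: unfold one step of pvLoopB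
    have hchain : pvPend (pvSortIns fl) PySem.Set.empty = pvSortIns (PySem.List.dedup fl) := by
      rw [pvPend_emptyv, pvDedup_sortIns]
    have hne : pvSortIns (PySem.List.dedup fl) ≠ [] := by
      intro hh
      have hlen2 := (pvSortIns_perm (PySem.List.dedup fl)).length_eq
      rw [hh] at hlen2
      simp only [List.length_nil] at hlen2
      omega
    obtain ⟨q, t, hq⟩ := List.exists_cons_of_ne_nil hne
    rw [pvSorted2_eq, show width.toNat * height.toNat + goals.length + 1 = U + 1 from rfl,
      hq, pvLoopB_cons, ← hq, hchain]
    simp only [pvSorted2_eq]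
    rfl

-- ===== VERDICT (by name: the statement is the Claim_ definition above) =====
theorem astar_dist_map_spec : Claim_equal_astar_dist_map := by
  intro goals blocked width height _
  unfold Spec_astar_dist_map
  exact astar_main goals blocked width height
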